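-- pv_equiv track=rewrite | github.com/StanleyKubic/factbook_exporter | parser.py | get_field_summary
-- ===== SOURCE A (Python) =====
-- from typing import Any, Dict, Optional
--
-- def get_field_summary(parsed_data: Dict[str, Dict[str, Optional[str]]]) -> Dict[str, int]:
--     """
--     Get a summary of field availability across all countries.
--
--     Args:
--         parsed_data: Parsed data for multiple countries
--
--     Returns:
--         Dictionary mapping field names to count of non-null values
--     """
--     if not parsed_data:
--         return {}
--
--     # Get all field names from the first country
--     first_country = next(iter(parsed_data.values()))
--     field_names = first_country.keys()
--
--     summary = {}
--     for field_name in field_names: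
--         count = sum(1 for country_data in parsed_data.values()
--                    if country_data.get(field_name) is not None)
--         summary[field_name] = count
--
--     return summary
-- ===== SOURCE B (Python) =====
-- def get_field_summary(parsed_data):
--     """Flat aggregation: one counter over all non-null (field, value) items of every
--     country, then a projection of the first country's fields out of that counter."""
--     if not parsed_data:
--         return {}
--     counts = {}
--     for country_data in parsed_data.values():
--         for field, value in country_data.items():
--             if value is not None:
--                 counts[field] = counts.get(field, 0) + 1
--     first_country = next(iter(parsed_data.values()))
--     return {field: counts.get(field, 0) for field in first_country}
-- ===== Notes on version B (the rewrite author's own statement) =====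
-- stated objective: alternative
-- what changed: A scans all countries once per first-country field; B instead aggregates every non-null item of every country into a single hash counter keyed by whatever field the item carries, then projects the first country's fields out of the counter, so no per-field scan and no fixed key set during counting exist.
import Mathlib
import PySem

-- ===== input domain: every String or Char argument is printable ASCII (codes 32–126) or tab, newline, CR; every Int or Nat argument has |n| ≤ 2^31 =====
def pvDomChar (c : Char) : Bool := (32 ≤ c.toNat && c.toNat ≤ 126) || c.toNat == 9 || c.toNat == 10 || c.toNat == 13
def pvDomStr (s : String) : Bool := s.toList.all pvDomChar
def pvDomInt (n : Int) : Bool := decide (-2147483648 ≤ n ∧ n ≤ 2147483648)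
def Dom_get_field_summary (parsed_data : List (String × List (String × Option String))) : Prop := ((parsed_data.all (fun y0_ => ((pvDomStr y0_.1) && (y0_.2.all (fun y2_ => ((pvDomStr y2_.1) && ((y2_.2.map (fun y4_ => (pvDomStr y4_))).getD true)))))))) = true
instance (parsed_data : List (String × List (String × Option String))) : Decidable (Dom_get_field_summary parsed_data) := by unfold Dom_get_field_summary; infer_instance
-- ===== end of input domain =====

-- B replaces A's per-field scans of all countries by one flat counter over every non-null item
-- of every country, projected at the end onto the first country's fields; same cost class.

-- ===== PORT A =====
-- country_data.get(field): first-match lookup in the association list, None when absent or stored None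
def pyGetField (cd : List (String × Option String)) (f : String) : Option String :=
  match cd with
  | [] => none
  | (k, v) :: rest => if k == f then v else pyGetField rest f

def get_field_summary (parsed_data : List (String × List (String × Option String))) : List (String × Int) :=
  match parsed_data with
  | [] => []
  | (_, first_country) :: _ =>
    -- field_names = first_country.keys(); summary built field by field, each field scanning all countries
    let field_names := first_country.map (·.1)
    let summary := field_names.foldl (fun d f =>
      d.insert f (((parsed_data.map (·.2)).map
        (fun cd => if (pyGetField cd f).isSome then (1 : Int) else 0)).sum)) PySem.Dict.empty
    summary.items

-- ===== PORT B =====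
def get_field_summary_alt (parsed_data : List (String × List (String × Option String))) : List (String × Int) :=
  match parsed_data with
  | [] => []
  | (_, first_country) :: _ =>
    -- counts[field] = counts.get(field, 0) + 1 for every non-null item of every country
    let counts := (parsed_data.map (·.2)).foldl (fun c cd =>
      cd.foldl (fun c p => if p.2.isSome then c.insert p.1 (c.getD p.1 0 + 1) else c) c)
      PySem.Dict.empty
    -- {field: counts.get(field, 0) for field in first_country}
    (first_country.foldl (fun d p => d.insert p.1 (counts.getD p.1 0)) PySem.Dict.empty).items

-- ===== PRECONDITION & SPEC =====
-- Pre_ excludes association lists with duplicate keys (outer or inner): those cannot arise from a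
-- Python dict, which this parameter is, so A is never applied to them.
def Pre_get_field_summary (parsed_data : List (String × List (String × Option String))) : Prop :=
  (parsed_data.map (·.1)).Nodup ∧ ∀ p ∈ parsed_data, (p.2.map (·.1)).Nodup
instance (parsed_data : List (String × List (String × Option String))) : Decidable (Pre_get_field_summary parsed_data) := by unfold Pre_get_field_summary; infer_instance

def pvWitness_get_field_summary : (List (String × List (String × Option String))) :=
  [("us", [("gdp", some "1"), ("pop", none)]), ("fr", [("gdp", none), ("pop", some "2")])]

def Spec_get_field_summary (parsed_data : List (String × List (String × Option String))) (out : List (String × Int)) : Prop := out = get_field_summary_alt parsed_data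
instance (parsed_data : List (String × List (String × Option String))) (out : List (String × Int)) : Decidable (Spec_get_field_summary parsed_data out) := by unfold Spec_get_field_summary; infer_instance

-- ===== CLAIM (what is proved, stated in full; the proofs are below) =====
def Claim_equal_get_field_summary : Prop := ∀ (parsed_data : List (String × List (String × Option String))), Dom_get_field_summary parsed_data → Pre_get_field_summary parsed_data → Spec_get_field_summary parsed_data (get_field_summary parsed_data)

-- ===== LEMMAS AND PROOFS =====

-- B's counting step over one country leaves untouched the counter of a field it does not carry
theorem getD_count_notmem (cd : List (String × Option String)) (c : PySem.Dict String Int)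
    (f : String) (h : f ∉ cd.map (·.1)) :
    (cd.foldl (fun c p => if p.2.isSome then c.insert p.1 (c.getD p.1 0 + 1) else c) c).getD f 0
      = c.getD f 0 := by
  induction cd generalizing c with
  | nil => rfl
  | cons p rest ih =>
    simp only [List.map_cons, List.mem_cons] at h
    push Not at h
    simp only [List.foldl_cons]
    by_cases hs : p.2.isSome
    · rw [if_pos hs, ih _ h.2, PySem.Dict.getD_insert, if_neg h.1]
    · rw [if_neg hs, ih _ h.2]

-- B's counting step over one country (with unique keys) adds 1 exactly when A's .get is non-null
theorem getD_count_country (cd : List (String × Option String)) (c : PySem.Dict String Int)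
    (f : String) (hnd : (cd.map (·.1)).Nodup) :
    (cd.foldl (fun c p => if p.2.isSome then c.insert p.1 (c.getD p.1 0 + 1) else c) c).getD f 0
      = c.getD f 0 + (if (pyGetField cd f).isSome then 1 else 0) := by
  induction cd generalizing c with
  | nil => simp [pyGetField]
  | cons p rest ih =>
    obtain ⟨k, v⟩ := p
    simp only [List.map_cons, List.nodup_cons] at hnd
    simp only [List.foldl_cons, pyGetField]
    by_cases hfk : k = f
    · subst hfk
      have hnot : k ∉ rest.map (·.1) := hnd.1
      by_cases hs : v.isSome
      · simp only [hs, beq_self_eq_true, if_true]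
        rw [getD_count_notmem _ _ _ hnot, PySem.Dict.getD_insert, if_pos rfl]
      · simp only [hs, beq_self_eq_true, if_true, Bool.false_eq_true, if_false]
        rw [getD_count_notmem _ _ _ hnot]
        simp
    · have hbk : (k == f) = false := by simp [fun h => hfk h]
      simp only [hbk, Bool.false_eq_true, if_false]
      by_cases hs : v.isSome
      · simp only [hs, if_true]
        rw [ih _ hnd.2, PySem.Dict.getD_insert, if_neg (fun h => hfk h.symm)]
      · simp only [hs, Bool.false_eq_true, if_false]
        rw [ih _ hnd.2]

-- B's outer counting pass accumulates the count of countries whose .get of f is non-null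
theorem getD_count_all (cs : List (List (String × Option String))) (c : PySem.Dict String Int)
    (f : String) (hnd : ∀ cd ∈ cs, (cd.map (·.1)).Nodup) :
    (cs.foldl (fun c cd =>
        cd.foldl (fun c p => if p.2.isSome then c.insert p.1 (c.getD p.1 0 + 1) else c) c) c).getD f 0
      = c.getD f 0 + (cs.countP (fun cd => (pyGetField cd f).isSome)) := by
  induction cs generalizing c with
  | nil => simp
  | cons cd cs ih =>
    simp only [List.foldl_cons, List.countP_cons]
    rw [ih _ (fun x hx => hnd x (by simp [hx])),
        getD_count_country cd c f (hnd cd (by simp))]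
    by_cases hs : (pyGetField cd f).isSome <;> simp [hs] <;> ring

-- B's projection over fc equals A's fold over fc's keys, once the counter value matches A's sum
theorem final_eq (fc : List (String × Option String)) (acc : PySem.Dict String Int)
    (c1 : String → Int) (cnt : PySem.Dict String Int)
    (h : ∀ f, cnt.getD f 0 = c1 f) :
    fc.foldl (fun d p => d.insert p.1 (cnt.getD p.1 0)) acc
      = (fc.map (·.1)).foldl (fun d k => d.insert k (c1 k)) acc := by
  induction fc generalizing acc with
  | nil => rfl
  | cons p t ih =>
    simp only [List.foldl_cons, List.map_cons]
    rw [h p.1]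
    exact ih _

theorem get_field_summary_spec : Claim_equal_get_field_summary := by
  intro parsed_data _ hpre
  unfold Spec_get_field_summary get_field_summary get_field_summary_alt
  match parsed_data with
  | [] => rfl
  | (c0, fc) :: rest =>
    simp only
    have hndin : ∀ cd ∈ ((c0, fc) :: rest).map (·.2), (cd.map (·.1)).Nodup := by
      intro cd hcd
      obtain ⟨p, hp, hpe⟩ := List.mem_map.mp hcd
      exact hpe ▸ hpre.2 p hp
    refine congrArg PySem.Dict.items (final_eq fc PySem.Dict.empty _ _ (fun f => ?_)).symm
    rw [getD_count_all _ _ _ hndin]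
    simp only [PySem.Dict.getD_empty, zero_add]
    rw [PySem.List.sum_map_ite_one_zero (fun cd => (pyGetField cd f).isSome)
        ((((c0, fc) :: rest)).map (·.2))]

-- ===== VERDICT (by name: the statement is the Claim_ definition above) =====
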